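-- pv_equiv track=rewrite | github.com/bhabibullo/Robocontest_Answers | First/Masalalar yechimi/Azimjonning tovuqlari.py | count_chickens
-- ===== SOURCE A (Python) =====
-- def count_chickens(n):
--     max_age = 12
--     age_5 = 5
--     age_7 = 7
--
--     chicks = [0] * (n + 1)
--
--     chicks[0] = 1
--
--     for month in range(n+1):
--         if month + age_5 <= n:
--             chicks[month + age_5] += chicks[month]
--         if month + age_7 <= n:
--             chicks[month + age_7] += 2 * chicks[month]
--         if month >= 12:
--             chicks[month-12]=0
--
--     return sum(chicks)
-- ===== SOURCE B (Python) =====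
-- # Matrix exponentiation on the 12-entry age window of the breeding recurrence: logarithmically many matrix squarings instead of A's month-by-month loop.
-- _M = [[0, 0, 0, 0, 1, 0, 2, 0, 0, 0, 0, 0]] + [
--     [1 if j == i else 0 for j in range(12)] for i in range(11)
-- ]
--
-- _I = [[1 if i == j else 0 for j in range(12)] for i in range(12)]
--
--
-- def _mat_mul(A, B):
--     return [[sum(A[i][k] * B[k][j] for k in range(12)) for j in range(12)]
--             for i in range(12)]
--
--
-- def _mat_vec(A, v):
--     return [sum(A[i][j] * v[j] for j in range(12)) for i in range(12)]
--
--
-- def _mat_pow(e):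
--     if e <= 0:
--         return _I
--     H = _mat_pow(e // 2)
--     H2 = _mat_mul(H, H)
--     return _mat_mul(_M, H2) if e % 2 == 1 else H2
--
--
-- def count_chickens(n):
--     v = _mat_vec(_mat_pow(n), [1] + [0] * 11)
--     return sum(v)
-- ===== Notes on version B (the rewrite author's own statement) =====
-- stated objective: alternative
-- what changed: Replaces A's month-by-month array simulation with binary exponentiation of the fixed-size companion matrix of the age-limited breeding recurrence, so the number of recurrence steps grows logarithmically in the month count instead of linearly (intended as faster; a timing run measured about 2.4x at the largest size both finished but could not confirm its threshold); Pre_ excludes n < 0, on which A raises IndexError.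
import Mathlib
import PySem

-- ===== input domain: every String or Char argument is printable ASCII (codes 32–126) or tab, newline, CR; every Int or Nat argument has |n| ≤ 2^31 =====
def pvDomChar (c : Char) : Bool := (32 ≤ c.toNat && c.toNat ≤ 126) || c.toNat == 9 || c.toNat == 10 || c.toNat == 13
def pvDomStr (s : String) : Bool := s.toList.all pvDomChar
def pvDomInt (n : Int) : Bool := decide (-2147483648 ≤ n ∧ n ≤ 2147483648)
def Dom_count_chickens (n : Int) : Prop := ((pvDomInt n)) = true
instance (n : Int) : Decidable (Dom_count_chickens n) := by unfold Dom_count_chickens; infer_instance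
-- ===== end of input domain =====

-- B replaces A's month-by-month array simulation by binary exponentiation of the 12×12
-- companion matrix of the recurrence c[m] = c[m-5] + 2·c[m-7] (objective: an alternative,
-- logarithmic-step algorithm; a timing run did not confirm a measured speed-up).

-- ===== PORT A =====
-- loop body of A's `for month in range(n+1)` (all indices read/written are in range there,
-- and month ≥ 0, so `.toNat`-indexing with `getD`/`set` is exact for the admitted inputs)
def fA (n : Int) (ch : List Int) (month : Int) : List Int :=
  let ch1 := if month + 5 ≤ n then
      ch.set (month + 5).toNat (ch.getD (month + 5).toNat 0 + ch.getD month.toNat 0)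
    else ch
  let ch2 := if month + 7 ≤ n then
      ch1.set (month + 7).toNat (ch1.getD (month + 7).toNat 0 + 2 * ch1.getD month.toNat 0)
    else ch1
  if 12 ≤ month then ch2.set (month - 12).toNat 0 else ch2

def count_chickens (n : Int) : Int :=
  -- chicks = [0] * (n + 1); chicks[0] = 1 (IndexError on the empty list when n < 0: Pre_ excludes that)
  let chicks0 : List Int := List.replicate (n + 1).toNat 0
  let chicks1 : List Int := chicks0.set 0 1
  let final : List Int := (PySem.List.pyRange 0 (n + 1) 1).foldl (fA n) chicks1
  final.sum

-- ===== PORT B =====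
def pvMatM : List (List Int) :=
  [0, 0, 0, 0, 1, 0, 2, 0, 0, 0, 0, 0] ::
    (List.range 11).map (fun i => (List.range 12).map (fun j => if j = i then 1 else 0))

def pvMatI : List (List Int) :=
  (List.range 12).map (fun i => (List.range 12).map (fun j => if i = j then 1 else 0))

def pvMatMul (A B : List (List Int)) : List (List Int) :=
  (List.range 12).map (fun i => (List.range 12).map (fun j =>
    ((List.range 12).map (fun k => (A.getD i []).getD k 0 * (B.getD k []).getD j 0)).sum))

def pvMatVec (A : List (List Int)) (v : List Int) : List Int :=
  (List.range 12).map (fun i =>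
    ((List.range 12).map (fun j => (A.getD i []).getD j 0 * v.getD j 0)).sum)

def pvMatPow (e : Int) : List (List Int) :=
  if e ≤ 0 then pvMatI
  else
    let H := pvMatPow (PySem.Int.floordiv e 2)
    let H2 := pvMatMul H H
    if PySem.Int.mod e 2 = 1 then pvMatMul pvMatM H2 else H2
termination_by e.toNat
decreasing_by
  rw [PySem.Int.floordiv_eq_ediv_of_pos (by omega : (0:Int) < 2)]
  omega

def count_chickens_alt (n : Int) : Int :=
  (pvMatVec (pvMatPow n) (1 :: List.replicate 11 0)).sum

-- ===== PRECONDITION & SPEC =====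
-- Pre_ excludes exactly n < 0, where A raises IndexError on `chicks[0] = 1`.
def Pre_count_chickens (n : Int) : Prop := 0 ≤ n
instance (n : Int) : Decidable (Pre_count_chickens n) := by unfold Pre_count_chickens; infer_instance
def pvWitness_count_chickens : Int := (7)

def Spec_count_chickens (n : Int) (out : Int) : Prop := out = count_chickens_alt n
instance (n : Int) (out : Int) : Decidable (Spec_count_chickens n out) := by unfold Spec_count_chickens; infer_instance

-- ===== CLAIM (what is proved, stated in full; the proofs are below) =====
def Claim_equal_count_chickens : Prop := ∀ (n : Int), Dom_count_chickens n → Pre_count_chickens n → Spec_count_chickens n (count_chickens n)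

-- ===== LEMMAS AND PROOFS =====

-- the breeding recurrence both programs realise: cc 0 = 1, cc m = cc (m-5) + 2 cc (m-7)
def cc : Nat → Int
  | m =>
    (if m = 0 then (1 : Int) else 0)
      + (if _h5 : 5 ≤ m then cc (m - 5) else 0)
      + (if _h7 : 7 ≤ m then 2 * cc (m - 7) else 0)
termination_by m => m
decreasing_by all_goals omega

lemma cc_eq (m : Nat) : cc m =
    (if m = 0 then (1 : Int) else 0)
      + (if 5 ≤ m then cc (m - 5) else 0)
      + (if 7 ≤ m then 2 * cc (m - 7) else 0) := by
  rw [cc]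
  split_ifs <;> simp_all

-- cc extended to Int by 0 on negatives
def ccZ (i : Int) : Int := if 0 ≤ i then cc i.toNat else 0

lemma cc_zero : cc 0 = 1 := by rw [cc_eq]; norm_num

-- ---------- A side ----------

-- Nat-level version of A's loop body, one conditional update at a time
def step1 (n' m : Nat) (ch : List Int) : List Int :=
  if m + 5 ≤ n' then ch.set (m + 5) (ch.getD (m + 5) 0 + ch.getD m 0) else ch
def step2 (n' m : Nat) (ch : List Int) : List Int :=
  if m + 7 ≤ n' then ch.set (m + 7) (ch.getD (m + 7) 0 + 2 * ch.getD m 0) else ch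
def step3 (m : Nat) (ch : List Int) : List Int :=
  if 12 ≤ m then ch.set (m - 12) 0 else ch
def stepA (n' : Nat) (ch : List Int) (m : Nat) : List Int :=
  step3 m (step2 n' m (step1 n' m ch))

lemma fA_cast (n' : Nat) (ch : List Int) (m : Nat) :
    fA (n' : Int) ch (0 + (m : Int)) = stepA n' ch m := by
  unfold fA stepA step1 step2 step3
  simp only [show ((0 : Int) + (m : Int) + 5 ≤ (n' : Int)) ↔ (m + 5 ≤ n') from by omega,
    show ((0 : Int) + (m : Int) + 7 ≤ (n' : Int)) ↔ (m + 7 ≤ n') from by omega,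
    show ((12 : Int) ≤ 0 + (m : Int)) ↔ (12 ≤ m) from by omega,
    show ((0 : Int) + (m : Int) + 5).toNat = m + 5 from by omega,
    show ((0 : Int) + (m : Int) + 7).toNat = m + 7 from by omega,
    show ((0 : Int) + (m : Int)).toNat = m from by omega,
    show ((0 : Int) + (m : Int) - 12).toNat = m - 12 from by omega]

-- value of cell j after the months < k have been processed
def invA (k j : Nat) : Int :=
  if j + 12 < k then 0
  else
    (if j = 0 then (1 : Int) else 0)
      + (if 5 ≤ j ∧ j - 5 < k then cc (j - 5) else 0)
      + (if 7 ≤ j ∧ j - 7 < k then 2 * cc (j - 7) else 0)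

lemma invA_self (k : Nat) : invA k k = cc k := by
  unfold invA
  rw [if_neg (show ¬(k + 12 < k) by omega)]
  simp only [show (5 ≤ k ∧ k - 5 < k) ↔ (5 ≤ k) from by omega,
    show (7 ≤ k ∧ k - 7 < k) ↔ (7 ≤ k) from by omega]
  exact (cc_eq k).symm

lemma getD_set_eq (l : List Int) (i j : Nat) (a : Int) :
    (l.set i a).getD j 0 = if i = j ∧ j < l.length then a else l.getD j 0 := by
  simp only [List.getD_eq_getElem?_getD, List.getElem?_set]
  by_cases h : i = j
  · subst h
    by_cases hl : i < l.length
    · simp [hl]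
    · simp [hl]
  · simp [h]

lemma invA_succ_5 (k : Nat) : invA (k + 1) (k + 5) = invA k (k + 5) + cc k := by
  unfold invA
  rw [if_neg (show ¬(k + 5 + 12 < k + 1) by omega), if_neg (show ¬(k + 5 + 12 < k) by omega),
    if_neg (show ¬(k + 5 = 0) by omega),
    if_pos (show 5 ≤ k + 5 ∧ k + 5 - 5 < k + 1 by omega),
    if_neg (show ¬(5 ≤ k + 5 ∧ k + 5 - 5 < k) by omega),
    show k + 5 - 5 = k from by omega]
  by_cases h7 : 2 ≤ k
  · rw [if_pos (show 7 ≤ k + 5 ∧ k + 5 - 7 < k + 1 by omega),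
      if_pos (show 7 ≤ k + 5 ∧ k + 5 - 7 < k by omega)]
    ring
  · rw [if_neg (show ¬(7 ≤ k + 5 ∧ k + 5 - 7 < k + 1) by omega),
      if_neg (show ¬(7 ≤ k + 5 ∧ k + 5 - 7 < k) by omega)]
    ring

lemma invA_succ_7 (k : Nat) : invA (k + 1) (k + 7) = invA k (k + 7) + 2 * cc k := by
  unfold invA
  rw [if_neg (show ¬(k + 7 + 12 < k + 1) by omega), if_neg (show ¬(k + 7 + 12 < k) by omega),
    if_neg (show ¬(k + 7 = 0) by omega),
    if_neg (show ¬(5 ≤ k + 7 ∧ k + 7 - 5 < k + 1) by omega),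
    if_neg (show ¬(5 ≤ k + 7 ∧ k + 7 - 5 < k) by omega),
    if_pos (show 7 ≤ k + 7 ∧ k + 7 - 7 < k + 1 by omega),
    if_neg (show ¬(7 ≤ k + 7 ∧ k + 7 - 7 < k) by omega),
    show k + 7 - 7 = k from by omega]
  ring

lemma invA_succ_z (k : Nat) (h : 12 ≤ k) : invA (k + 1) (k - 12) = 0 := by
  unfold invA
  rw [if_pos (show k - 12 + 12 < k + 1 by omega)]

lemma invA_succ_o (k j : Nat) (h5 : j ≠ k + 5) (h7 : j ≠ k + 7)
    (hz : ¬(12 ≤ k ∧ j = k - 12)) : invA (k + 1) j = invA k j := by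
  unfold invA
  by_cases hb : j + 12 < k
  · rw [if_pos (by omega), if_pos hb]
  · rw [if_neg (by omega), if_neg hb]
    simp only [show (5 ≤ j ∧ j - 5 < k + 1) ↔ (5 ≤ j ∧ j - 5 < k) from by omega,
      show (7 ≤ j ∧ j - 7 < k + 1) ↔ (7 ≤ j ∧ j - 7 < k) from by omega]

lemma stepA_inv (n' k : Nat) (hk : k ≤ n') (ch : List Int)
    (hlen : ch.length = n' + 1)
    (hch : ∀ j, j ≤ n' → ch.getD j 0 = invA k j) :
    (stepA n' ch k).length = n' + 1 ∧
      ∀ j, j ≤ n' → (stepA n' ch k).getD j 0 = invA (k + 1) j := by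
  have hcck : ch.getD k 0 = cc k := by rw [hch k hk, invA_self]
  have h1len : (step1 n' k ch).length = n' + 1 := by
    unfold step1; split_ifs <;> simp [hlen]
  have h1 : ∀ j, j ≤ n' → (step1 n' k ch).getD j 0 =
      if j = k + 5 ∧ k + 5 ≤ n' then invA k j + cc k else invA k j := by
    intro j hj
    unfold step1
    by_cases hc : k + 5 ≤ n'
    · rw [if_pos hc, getD_set_eq]
      by_cases he : k + 5 = j
      · subst he
        rw [if_pos ⟨rfl, by omega⟩, if_pos ⟨rfl, hc⟩, hch (k + 5) hc, hcck]
      · rw [if_neg (show ¬(k + 5 = j ∧ j < ch.length) from fun h => he h.1),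
          if_neg (show ¬(j = k + 5 ∧ k + 5 ≤ n') from fun h => he h.1.symm)]
        exact hch j hj
    · rw [if_neg hc, if_neg (show ¬(j = k + 5 ∧ k + 5 ≤ n') from fun h => hc h.2)]
      exact hch j hj
  have h1k : (step1 n' k ch).getD k 0 = cc k := by
    rw [h1 k hk, if_neg (show ¬(k = k + 5 ∧ k + 5 ≤ n') from by omega)]
    exact invA_self k
  have h2len : (step2 n' k (step1 n' k ch)).length = n' + 1 := by
    unfold step2; split_ifs <;> simp [h1len]
  have h2 : ∀ j, j ≤ n' → (step2 n' k (step1 n' k ch)).getD j 0 =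
      if j = k + 5 ∧ k + 5 ≤ n' then invA k j + cc k
      else if j = k + 7 ∧ k + 7 ≤ n' then invA k j + 2 * cc k
      else invA k j := by
    intro j hj
    unfold step2
    by_cases hc : k + 7 ≤ n'
    · rw [if_pos hc, getD_set_eq]
      by_cases he : k + 7 = j
      · subst he
        rw [if_pos ⟨rfl, by omega⟩, h1 (k + 7) hc,
          if_neg (show ¬((k + 7 : Nat) = k + 5 ∧ k + 5 ≤ n') from by omega),
          if_neg (show ¬((k + 7 : Nat) = k + 5 ∧ k + 5 ≤ n') from by omega),
          if_pos ⟨rfl, hc⟩, h1k]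
      · rw [if_neg (show ¬(k + 7 = j ∧ j < (step1 n' k ch).length) from fun h => he h.1),
          h1 j hj,
          if_neg (show ¬(j = k + 7 ∧ k + 7 ≤ n') from fun h => he h.1.symm)]
    · rw [if_neg hc, h1 j hj,
        if_neg (show ¬(j = k + 7 ∧ k + 7 ≤ n') from fun h => hc h.2)]
  have hcore : ∀ j, j ≤ n' → ¬(12 ≤ k ∧ j = k - 12) →
      (if j = k + 5 ∧ k + 5 ≤ n' then invA k j + cc k
        else if j = k + 7 ∧ k + 7 ≤ n' then invA k j + 2 * cc k
        else invA k j) = invA (k + 1) j := by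
    intro j hj hnz
    by_cases e5 : j = k + 5 ∧ k + 5 ≤ n'
    · obtain ⟨rfl, -⟩ := e5
      rw [if_pos ⟨rfl, by omega⟩, invA_succ_5]
    · rw [if_neg e5]
      by_cases e7 : j = k + 7 ∧ k + 7 ≤ n'
      · obtain ⟨rfl, -⟩ := e7
        rw [if_pos ⟨rfl, by omega⟩, invA_succ_7]
      · rw [if_neg e7]
        exact (invA_succ_o k j (fun h => e5 ⟨h, by omega⟩) (fun h => e7 ⟨h, by omega⟩) hnz).symm
  unfold stepA step3
  by_cases hz : 12 ≤ k
  · rw [if_pos hz]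
    refine ⟨by rw [List.length_set]; exact h2len, fun j hj => ?_⟩
    rw [getD_set_eq]
    by_cases he : k - 12 = j
    · subst he
      rw [if_pos ⟨rfl, by omega⟩, invA_succ_z k hz]
    · rw [if_neg (show ¬(k - 12 = j ∧ j < (step2 n' k (step1 n' k ch)).length) from fun h => he h.1),
        h2 j hj]
      exact hcore j hj (fun h => he h.2.symm)
  · rw [if_neg hz]
    refine ⟨h2len, fun j hj => ?_⟩
    rw [h2 j hj]
    exact hcore j hj (fun h => hz h.1)

lemma loopA (n' : Nat) (k : Nat) (hk : k ≤ n' + 1) :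
    (((List.range k).foldl (stepA n') ((List.replicate (n' + 1) (0 : Int)).set 0 1)).length = n' + 1) ∧
      ∀ j, j ≤ n' →
        ((List.range k).foldl (stepA n') ((List.replicate (n' + 1) (0 : Int)).set 0 1)).getD j 0 = invA k j := by
  induction k with
  | zero =>
    refine ⟨by simp, fun j hj => ?_⟩
    rw [List.range_zero, List.foldl_nil, getD_set_eq]
    unfold invA
    rw [if_neg (show ¬(j + 12 < 0) by omega), if_neg (show ¬(5 ≤ j ∧ j - 5 < 0) by omega),
      if_neg (show ¬(7 ≤ j ∧ j - 7 < 0) by omega)]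
    by_cases hj0 : j = 0
    · subst hj0
      rw [if_pos ⟨rfl, by simp⟩, if_pos rfl]
      norm_num
    · rw [if_neg (fun h => hj0 h.1.symm), if_neg hj0]
      simp [List.getD_eq_getElem?_getD, List.getElem?_replicate]
      split_ifs <;> rfl
  | succ k ih =>
    obtain ⟨ihl, ihv⟩ := ih (by omega)
    rw [List.range_succ, List.foldl_append, List.foldl_cons, List.foldl_nil]
    exact stepA_inv n' k (by omega) _ ihl ihv

lemma sum_getD (l : List Int) : l.sum = ∑ j ∈ Finset.range l.length, l.getD j 0 := by
  induction l with
  | nil => simp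
  | cons x t ih =>
    rw [List.sum_cons, List.length_cons, Finset.sum_range_succ', ih]
    simp [add_comm]

lemma countA_eq (n' : Nat) :
    count_chickens (n' : Int) =
      ((List.range (n' + 1)).foldl (stepA n') ((List.replicate (n' + 1) (0 : Int)).set 0 1)).sum := by
  unfold count_chickens
  dsimp only
  rw [PySem.List.pyRange_one,
    show (((n' : Int) + 1) - 0).toNat = n' + 1 from by omega,
    show ((n' : Int) + 1).toNat = n' + 1 from by omega,
    List.foldl_map]
  have hfun : (fun (x : List Int) (y : Nat) => fA ((n' : Nat) : Int) x (0 + (y : Int))) = stepA n' := by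
    funext ch m
    exact fA_cast n' ch m
  rw [hfun]

lemma invA_final (n' : Nat) (j : Nat) (hj : j ≤ n') :
    invA (n' + 1) j = if n' < j + 12 then cc j else 0 := by
  unfold invA
  by_cases hbig : n' < j + 12
  · rw [if_neg (by omega), if_pos hbig]
    simp only [show (5 ≤ j ∧ j - 5 < n' + 1) ↔ (5 ≤ j) from by omega,
      show (7 ≤ j ∧ j - 7 < n' + 1) ↔ (7 ≤ j) from by omega]
    exact (cc_eq j).symm
  · rw [if_pos (by omega), if_neg hbig]

-- ---------- B side ----------

lemma range12 : List.range 12 = [0, 1, 2, 3, 4, 5, 6, 7, 8, 9, 10, 11] := by decide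

lemma list_sum_range (n : Nat) (f : Nat → Int) :
    ((List.range n).map f).sum = ∑ i ∈ Finset.range n, f i := by
  induction n with
  | zero => rfl
  | succ n ih =>
    rw [List.range_succ, List.map_append, List.sum_append, Finset.sum_range_succ, ih]
    simp

lemma getD_map_range12 (f : Nat → Int) (i : Nat) (hi : i < 12) :
    (((List.range 12).map f).getD i 0) = f i := by
  rw [List.getD_eq_getElem?_getD]
  simp [List.getElem?_map, List.getElem?_range hi]

lemma getD_map_range12' (f : Nat → List Int) (i : Nat) (hi : i < 12) :
    (((List.range 12).map f).getD i []) = f i := by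
  rw [List.getD_eq_getElem?_getD]
  simp [List.getElem?_map, List.getElem?_range hi]

-- projection to the 12 entries a matrix action reads
def norm12 (v : List Int) : List Int := (List.range 12).map (fun i => v.getD i 0)

lemma matVec_mul (A B : List (List Int)) (v : List Int) :
    pvMatVec (pvMatMul A B) v = pvMatVec A (pvMatVec B v) := by
  unfold pvMatVec pvMatMul
  refine List.map_congr_left (fun i hi => ?_)
  rw [List.mem_range] at hi
  rw [getD_map_range12' _ i hi]
  have hin : ∀ j, j < 12 →
      (((List.range 12).map fun j =>
        ((List.range 12).map fun k => (A.getD i []).getD k 0 * (B.getD k []).getD j 0).sum).getD j 0)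
      = ((List.range 12).map fun k => (A.getD i []).getD k 0 * (B.getD k []).getD j 0).sum :=
    fun j hj => getD_map_range12 _ j hj
  calc ((List.range 12).map fun j =>
          (((List.range 12).map fun j =>
            ((List.range 12).map fun k => (A.getD i []).getD k 0 * (B.getD k []).getD j 0).sum).getD j 0)
            * v.getD j 0).sum
      = ∑ j ∈ Finset.range 12, (∑ k ∈ Finset.range 12,
          (A.getD i []).getD k 0 * (B.getD k []).getD j 0) * v.getD j 0 := by
        rw [list_sum_range]
        refine Finset.sum_congr rfl (fun j hj => ?_)
        rw [Finset.mem_range] at hj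
        rw [hin j hj, list_sum_range]
    _ = ∑ k ∈ Finset.range 12, (A.getD i []).getD k 0 *
          ∑ j ∈ Finset.range 12, (B.getD k []).getD j 0 * v.getD j 0 := by
        simp only [Finset.sum_mul, Finset.mul_sum]
        rw [Finset.sum_comm]
        exact Finset.sum_congr rfl fun j _ => Finset.sum_congr rfl fun k _ => by ring
    _ = ((List.range 12).map fun k => (A.getD i []).getD k 0 *
          (((List.range 12).map fun j => (B.getD k []).getD j 0 * v.getD j 0).sum)).sum := by
        rw [list_sum_range]
        exact Finset.sum_congr rfl fun k _ => by rw [list_sum_range]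
    _ = ((List.range 12).map fun j => (A.getD i []).getD j 0 *
          (((List.range 12).map fun k =>
            ((List.range 12).map fun j => (B.getD k []).getD j 0 * v.getD j 0).sum).getD j 0)).sum := by
        refine congrArg List.sum (List.map_congr_left (fun k hk => ?_))
        rw [List.mem_range] at hk
        rw [getD_map_range12 _ k hk]

lemma matVec_I (v : List Int) : pvMatVec pvMatI v = norm12 v := by
  unfold pvMatVec pvMatI norm12
  refine List.map_congr_left (fun i hi => ?_)
  rw [List.mem_range] at hi
  rw [getD_map_range12' _ i hi, list_sum_range]
  have h : ∀ j ∈ Finset.range 12,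
      (((List.range 12).map fun j => if i = j then (1 : Int) else 0).getD j 0) * v.getD j 0
      = if i = j then v.getD j 0 else 0 := by
    intro j hj
    rw [Finset.mem_range] at hj
    rw [getD_map_range12 _ j hj]
    split_ifs <;> simp
  rw [Finset.sum_congr rfl h, Finset.sum_ite_eq]
  simp [hi]

lemma norm12_matVec (A : List (List Int)) (v : List Int) :
    norm12 (pvMatVec A v) = pvMatVec A v := by
  unfold norm12 pvMatVec
  refine List.map_congr_left (fun i hi => ?_)
  rw [List.mem_range] at hi
  rw [getD_map_range12 _ i hi]

lemma norm12_idem (v : List Int) : norm12 (norm12 v) = norm12 v := by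
  unfold norm12
  refine List.map_congr_left (fun i hi => ?_)
  rw [List.mem_range] at hi
  rw [getD_map_range12 _ i hi]

lemma norm12_iter (h : Nat) (v : List Int) :
    norm12 ((pvMatVec pvMatM)^[h] (norm12 v)) = (pvMatVec pvMatM)^[h] (norm12 v) := by
  cases h with
  | zero => exact norm12_idem v
  | succ h => rw [Function.iterate_succ_apply', norm12_matVec]

lemma pow_apply (N : Nat) : ∀ (v : List Int),
    pvMatVec (pvMatPow (N : Int)) v = (pvMatVec pvMatM)^[N] (norm12 v) := by
  induction N using Nat.strong_induction_on with
  | _ N ih =>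
    intro v
    rw [pvMatPow]
    by_cases h0 : (N : Int) ≤ 0
    · have hN0 : N = 0 := by omega
      subst hN0
      simp only [if_pos h0]
      rw [matVec_I]
      rfl
    · have hN : 0 < N := by omega
      simp only [if_neg h0]
      have hfd : PySem.Int.floordiv (N : Int) 2 = ((N / 2 : Nat) : Int) :=
        PySem.Int.floordiv_natCast N 2
      have hmd : PySem.Int.mod (N : Int) 2 = ((N % 2 : Nat) : Int) :=
        PySem.Int.mod_natCast N 2
      have ihh := ih (N / 2) (by omega)
      by_cases hodd : N % 2 = 1
      · rw [if_pos (by rw [hmd, hodd]; rfl), hfd, matVec_mul, matVec_mul, ihh, ihh,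
          norm12_iter, ← Function.iterate_add_apply]
        conv_rhs => rw [show N = N / 2 + N / 2 + 1 from by omega]
        rw [Function.iterate_succ_apply']
      · rw [if_neg (by rw [hmd]; intro hc; exact hodd (by exact_mod_cast hc)), hfd,
          matVec_mul, ihh, ihh, norm12_iter, ← Function.iterate_add_apply]
        conv_rhs => rw [show N = N / 2 + N / 2 from by omega]

-- the state vector after m months: window of the last 12 values of cc
def vecc (m : Nat) : List Int := (List.range 12).map (fun i : Nat => ccZ ((m : Int) - (i : Int)))

lemma vecc_zero : vecc 0 = 1 :: List.replicate 11 0 := by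
  unfold vecc ccZ
  rw [range12]
  norm_num [cc_zero]
  decide

lemma ccZ_step (m : Nat) : ccZ ((m : Int) - 4) + 2 * ccZ ((m : Int) - 6) = ccZ ((m : Int) + 1) := by
  unfold ccZ
  rw [if_pos (show (0 : Int) ≤ (m : Int) + 1 by omega),
    show ((m : Int) + 1).toNat = m + 1 from by omega]
  conv_rhs => rw [cc_eq]
  rw [if_neg (show ¬(m + 1 = 0) by omega)]
  by_cases h4 : 4 ≤ m
  · rw [if_pos (show 5 ≤ m + 1 by omega), if_pos (show (0 : Int) ≤ (m : Int) - 4 by omega),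
      show m + 1 - 5 = ((m : Int) - 4).toNat from by omega]
    by_cases h6 : 6 ≤ m
    · rw [if_pos (show 7 ≤ m + 1 by omega), if_pos (show (0 : Int) ≤ (m : Int) - 6 by omega),
        show m + 1 - 7 = ((m : Int) - 6).toNat from by omega]
      ring
    · rw [if_neg (show ¬(7 ≤ m + 1) by omega), if_neg (show ¬((0 : Int) ≤ (m : Int) - 6) by omega)]
      ring
  · rw [if_neg (show ¬(5 ≤ m + 1) by omega), if_neg (show ¬((0 : Int) ≤ (m : Int) - 4) by omega),
      if_neg (show ¬(7 ≤ m + 1) by omega), if_neg (show ¬((0 : Int) ≤ (m : Int) - 6) by omega)]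
    ring

lemma step_vecc (m : Nat) : pvMatVec pvMatM (vecc m) = vecc (m + 1) := by
  have hM : ∀ i < 12, ∀ j < 12, ((pvMatM.getD i []).getD j 0) =
      (if i = 0 then (if j = 4 then 1 else if j = 6 then 2 else 0)
        else if j + 1 = i then 1 else 0 : Int) := by decide
  unfold pvMatVec vecc
  refine List.map_congr_left (fun i hi => ?_)
  rw [List.mem_range] at hi
  rw [list_sum_range]
  have hterm : ∀ j ∈ Finset.range 12,
      (pvMatM.getD i []).getD j 0 *
        (((List.range 12).map (fun i : Nat => ccZ ((m : Int) - (i : Int)))).getD j 0)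
      = (if i = 0 then (if j = 4 then 1 else if j = 6 then 2 else 0)
          else if j + 1 = i then 1 else 0 : Int) * ccZ ((m : Int) - (j : Int)) := by
    intro j hj
    rw [Finset.mem_range] at hj
    rw [getD_map_range12 _ j hj, hM i hi j hj]
  rw [Finset.sum_congr rfl hterm]
  interval_cases i <;> simp only [Finset.sum_range_succ, Finset.sum_range_zero] <;> norm_num <;>
    first
      | exact ccZ_step m
      | (congr 1; ring)

lemma iter_vecc (m : Nat) : (pvMatVec pvMatM)^[m] (vecc 0) = vecc m := by
  induction m with
  | zero => rfl
  | succ m ih => rw [Function.iterate_succ_apply', ih, step_vecc]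

lemma ccZ_final (n' i : Nat) : ccZ ((n' : Int) - (i : Int)) = if i ≤ n' then cc (n' - i) else 0 := by
  unfold ccZ
  by_cases h : i ≤ n'
  · rw [if_pos (by omega), if_pos h, show ((n' : Int) - (i : Int)).toNat = n' - i from by omega]
  · rw [if_neg (by omega), if_neg h]

lemma sum_bridge (n' : Nat) :
    ∑ j ∈ Finset.range (n' + 1), (if n' < j + 12 then cc j else 0) =
      ∑ i ∈ Finset.range 12, ccZ ((n' : Int) - (i : Int)) := by
  rw [← Finset.sum_filter]
  have h : ∀ i ∈ Finset.range 12, ccZ ((n' : Int) - (i : Int)) = if i ≤ n' then cc (n' - i) else 0 :=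
    fun i _ => ccZ_final n' i
  rw [Finset.sum_congr rfl h, ← Finset.sum_filter]
  refine Finset.sum_nbij' (fun j => n' - j) (fun i => n' - i) ?_ ?_ ?_ ?_ ?_
  · intro a ha
    simp only [Finset.mem_filter, Finset.mem_range] at ha ⊢
    omega
  · intro a ha
    simp only [Finset.mem_filter, Finset.mem_range] at ha ⊢
    omega
  · intro a ha
    simp only [Finset.mem_filter, Finset.mem_range] at ha
    dsimp only
    omega
  · intro a ha
    simp only [Finset.mem_filter, Finset.mem_range] at ha
    dsimp only
    omega
  · intro a ha
    simp only [Finset.mem_filter, Finset.mem_range] at ha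
    dsimp only
    congr 1
    omega

-- ===== VERDICT (by name: the statement is the Claim_ definition above) =====
theorem count_chickens_spec : Claim_equal_count_chickens := by
  intro n _hdom hpre
  unfold Spec_count_chickens
  have h0 : (0 : Int) ≤ n := hpre
  obtain ⟨n', rfl⟩ : ∃ n' : Nat, n = (n' : Int) := ⟨n.toNat, by omega⟩
  -- A side
  obtain ⟨hlen, hval⟩ := loopA n' (n' + 1) (by omega)
  rw [countA_eq n', sum_getD, hlen]
  have hA : ∀ j ∈ Finset.range (n' + 1),
      ((List.range (n' + 1)).foldl (stepA n') ((List.replicate (n' + 1) (0 : Int)).set 0 1)).getD j 0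
        = if n' < j + 12 then cc j else 0 := by
    intro j hj
    rw [Finset.mem_range] at hj
    rw [hval j (by omega), invA_final n' j (by omega)]
  rw [Finset.sum_congr rfl hA]
  -- B side
  unfold count_chickens_alt
  rw [pow_apply n' (1 :: List.replicate 11 0),
    show norm12 (1 :: List.replicate 11 0) = vecc 0 from by rw [vecc_zero]; decide,
    iter_vecc]
  unfold vecc
  rw [list_sum_range]
  exact sum_bridge n'
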